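-- pv_equiv track=rewrite | github.com/DerKevinRiehl/c_eq_alinea | model_creation/model_outer_ring/model_creation_amsterdam/9_demand_od_estimation.py | determine_sensor_routes
-- ===== SOURCE A (Python) =====
-- def determine_sensor_routes(route_edges, sensor_edges):
--     sensor_routes = {}
--     for sensor in sensor_edges:
--         sensor_routes[sensor] = []
--     for route in route_edges:
--         edges = route_edges[route]
--         for edge in edges:
--             for sensor in sensor_edges:
--                 if sensor_edges[sensor] == edge:
--                     if route not in sensor_routes[sensor]:
--                         sensor_routes[sensor].append(route)
--     return sensor_routes
-- ===== SOURCE B (Python) =====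
-- def determine_sensor_routes(route_edges, sensor_edges):
--     # Invert once: edge -> routes (in route order) whose edge list contains it.
--     edge_to_routes = {}
--     for route, edges in route_edges.items():
--         for edge in dict.fromkeys(edges):  # distinct edges of this route
--             edge_to_routes.setdefault(edge, []).append(route)
--     return {sensor: list(edge_to_routes.get(edge, []))
--             for sensor, edge in sensor_edges.items()}
-- ===== Notes on version B (the rewrite author's own statement) =====
-- stated objective: faster
-- what changed: Replaces A's triple nested scan (for every route edge, scan all sensors) by a single pass that builds an edge->routes inverted index and then maps each sensor's edge through one dictionary lookup.
import Mathlib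
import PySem

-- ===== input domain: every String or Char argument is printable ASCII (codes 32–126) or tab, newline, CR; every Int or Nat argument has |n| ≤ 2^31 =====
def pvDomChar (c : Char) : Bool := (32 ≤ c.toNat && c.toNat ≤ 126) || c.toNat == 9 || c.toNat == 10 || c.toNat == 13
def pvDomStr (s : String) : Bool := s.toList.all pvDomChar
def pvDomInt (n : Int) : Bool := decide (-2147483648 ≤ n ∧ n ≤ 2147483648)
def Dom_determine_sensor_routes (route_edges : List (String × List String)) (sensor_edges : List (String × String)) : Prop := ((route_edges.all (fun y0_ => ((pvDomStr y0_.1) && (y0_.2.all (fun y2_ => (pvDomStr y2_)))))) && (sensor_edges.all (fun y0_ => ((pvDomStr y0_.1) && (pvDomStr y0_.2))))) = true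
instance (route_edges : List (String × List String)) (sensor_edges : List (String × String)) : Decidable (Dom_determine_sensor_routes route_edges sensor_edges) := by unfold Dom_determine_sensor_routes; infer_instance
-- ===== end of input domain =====

-- B replaces A's triple nested scan by an edge->routes inverted index built in one pass
-- over the routes, then one dictionary lookup per sensor (objective: faster).

-- ===== PORT A =====
-- innermost loop body: 'for sensor in sensor_edges: if sensor_edges[sensor] == edge: …'
def srStepSensor (sd : PySem.Dict String String) (route edge : String)
    (sr : PySem.Dict String (List String)) (sensor : String) : PySem.Dict String (List String) :=
  if sd.getD sensor "" == edge then
    if (sr.getD sensor []).contains route then sr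
    else sr.modify sensor [] (fun l => l ++ [route])
  else sr

-- 'for edge in edges:' body
def srStepEdge (sd : PySem.Dict String String) (route : String)
    (sr : PySem.Dict String (List String)) (edge : String) : PySem.Dict String (List String) :=
  sd.keys.foldl (srStepSensor sd route edge) sr

-- 'for route in route_edges:' body
def srStepRoute (rd : PySem.Dict String (List String)) (sd : PySem.Dict String String)
    (sr : PySem.Dict String (List String)) (route : String) : PySem.Dict String (List String) :=
  (rd.getD route []).foldl (srStepEdge sd route) sr

def determine_sensor_routes (route_edges : List (String × List String)) (sensor_edges : List (String × String)) : List (String × List String) :=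
  let rd := PySem.Dict.ofList route_edges
  let sd := PySem.Dict.ofList sensor_edges
  let sr0 : PySem.Dict String (List String) :=
    sd.keys.foldl (fun d s => d.insert s ([] : List String)) PySem.Dict.empty
  (rd.keys.foldl (srStepRoute rd sd) sr0).items

-- ===== PORT B =====
-- 'for edge in dict.fromkeys(edges): edge_to_routes.setdefault(edge, []).append(route)'
def e2rStep (d : PySem.Dict String (List String)) (p : String × List String) : PySem.Dict String (List String) :=
  (PySem.List.dedup p.2).foldl (fun d edge => d.modify edge [] (fun l => l ++ [p.1])) d

def determine_sensor_routes_alt (route_edges : List (String × List String)) (sensor_edges : List (String × String)) : List (String × List String) :=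
  let rd := PySem.Dict.ofList route_edges
  let sd := PySem.Dict.ofList sensor_edges
  let e2r := rd.items.foldl e2rStep PySem.Dict.empty
  let res : PySem.Dict String (List String) :=
    sd.items.foldl (fun d q => d.insert q.1 (e2r.getD q.2 [])) PySem.Dict.empty
  res.items

-- ===== PRECONDITION & SPEC =====
def Spec_determine_sensor_routes (route_edges : List (String × List String)) (sensor_edges : List (String × String)) (out : List (String × List String)) : Prop := out = determine_sensor_routes_alt route_edges sensor_edges
instance (route_edges : List (String × List String)) (sensor_edges : List (String × String)) (out : List (String × List String)) : Decidable (Spec_determine_sensor_routes route_edges sensor_edges out) := by unfold Spec_determine_sensor_routes; infer_instance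

-- ===== CLAIM (what is proved, stated in full; the proofs are below) =====
def Claim_equal_determine_sensor_routes : Prop := ∀ (route_edges : List (String × List String)) (sensor_edges : List (String × String)), Dom_determine_sensor_routes route_edges sensor_edges → Spec_determine_sensor_routes route_edges sensor_edges (determine_sensor_routes route_edges sensor_edges)

-- ===== LEMMAS AND PROOFS =====

-- B's inner append loop, over a duplicate-free edge list
theorem inner_append_getD (r e : String) (edges : List String) (hnd : edges.Nodup)
    (d : PySem.Dict String (List String)) :
    (edges.foldl (fun d x => d.modify x [] (fun l => l ++ [r])) d).getD e []
      = d.getD e [] ++ (if e ∈ edges then [r] else []) := by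
  induction edges generalizing d with
  | nil => simp
  | cons x xs ih =>
    rcases List.nodup_cons.mp hnd with ⟨hx, hxs⟩
    simp only [List.foldl_cons]
    rw [ih hxs]
    by_cases h : e = x
    · subst h
      rw [PySem.Dict.getD_modify_self]
      simp [hx]
    · rw [PySem.Dict.getD_modify_of_ne d _ _ h]
      simp [List.mem_cons, h]

theorem e2r_getD (e : String) (l : List (String × List String))
    (d : PySem.Dict String (List String)) :
    (l.foldl e2rStep d).getD e []
      = d.getD e [] ++ (l.filter (fun p => p.2.contains e)).map (·.1) := by
  induction l generalizing d with
  | nil => simp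
  | cons p ps ih =>
    simp only [List.foldl_cons, ih, e2rStep]
    rw [inner_append_getD _ _ _ (PySem.List.nodup_dedup _)]
    by_cases h : e ∈ p.2
    · simp [h]
    · simp [h]

-- A's innermost sensor loop leaves keys it never modifies alone
theorem sensorfold_untouched (sd : PySem.Dict String String) (r e s : String)
    (ks : List String) (h : s ∉ ks) (sr : PySem.Dict String (List String)) :
    (ks.foldl (srStepSensor sd r e) sr).getD s [] = sr.getD s [] := by
  induction ks generalizing sr with
  | nil => rfl
  | cons k ks ih =>
    have hsk : s ≠ k := fun hh => h (hh ▸ List.mem_cons_self)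
    have h' : s ∉ ks := fun hh => h (List.mem_cons_of_mem _ hh)
    simp only [List.foldl_cons]
    rw [ih h']
    unfold srStepSensor
    split_ifs with h1 h2
    · rfl
    · exact PySem.Dict.getD_modify_of_ne sr _ _ hsk
    · rfl

theorem sensorfold_getD (sd : PySem.Dict String String) (r e s : String)
    (ks : List String) (hnd : ks.Nodup) (sr : PySem.Dict String (List String)) :
    (ks.foldl (srStepSensor sd r e) sr).getD s []
      = if s ∈ ks ∧ sd.getD s "" = e ∧ r ∉ sr.getD s []
        then sr.getD s [] ++ [r] else sr.getD s [] := by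
  induction ks generalizing sr with
  | nil => simp
  | cons k ks ih =>
    rcases List.nodup_cons.mp hnd with ⟨hk, hks⟩
    simp only [List.foldl_cons]
    by_cases h : s = k
    · subst h
      rw [sensorfold_untouched sd r e s ks hk]
      unfold srStepSensor
      by_cases h1 : sd.getD s "" = e
      · by_cases h2 : r ∈ sr.getD s []
        · rw [if_pos (by simp [h1]), if_pos (by simpa using h2), if_neg (by tauto)]
        · rw [if_pos (by simp [h1]), if_neg (by simp [h2]),
            PySem.Dict.getD_modify_self, if_pos ⟨List.mem_cons_self, h1, h2⟩]
      · rw [if_neg (by simp [h1]), if_neg (by tauto)]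
    · have hsr : (srStepSensor sd r e sr k).getD s [] = sr.getD s [] := by
        unfold srStepSensor
        split_ifs with h1 h2
        · rfl
        · exact PySem.Dict.getD_modify_of_ne sr _ _ h
        · rfl
      rw [ih hks, hsr]
      simp [List.mem_cons, h]

-- once a route is recorded for a sensor, further edges of the same route add nothing
theorem edgefold_getD (sd : PySem.Dict String String) (r s : String)
    (hks : sd.keys.Nodup) (edges : List String) (sr : PySem.Dict String (List String)) :
    (edges.foldl (srStepEdge sd r) sr).getD s []
      = if s ∈ sd.keys ∧ sd.getD s "" ∈ edges ∧ r ∉ sr.getD s []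
        then sr.getD s [] ++ [r] else sr.getD s [] := by
  induction edges generalizing sr with
  | nil => simp
  | cons e es ih =>
    simp only [List.foldl_cons]
    have hstep : (srStepEdge sd r sr e).getD s []
        = if s ∈ sd.keys ∧ sd.getD s "" = e ∧ r ∉ sr.getD s []
          then sr.getD s [] ++ [r] else sr.getD s [] := by
      unfold srStepEdge
      exact sensorfold_getD sd r e s sd.keys hks sr
    rw [ih, hstep]
    by_cases h1 : s ∈ sd.keys <;> by_cases h2 : sd.getD s "" = e <;>
      by_cases h3 : sd.getD s "" ∈ es <;> by_cases h4 : r ∈ sr.getD s [] <;>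
      simp [h1, h2, h3, h4, List.mem_cons]

-- the route loop: each new route lands exactly on the sensors whose edge occurs among its edges
theorem routefold_getD (rd : PySem.Dict String (List String)) (sd : PySem.Dict String String)
    (s : String) (hks : sd.keys.Nodup) (routes : List String) (hnd : routes.Nodup)
    (sr : PySem.Dict String (List String))
    (hdisj : ∀ x ∈ sr.getD s [], x ∉ routes) :
    (routes.foldl (srStepRoute rd sd) sr).getD s []
      = sr.getD s [] ++ (if s ∈ sd.keys
          then routes.filter (fun r => (rd.getD r []).contains (sd.getD s ""))
          else []) := by
  induction routes generalizing sr with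
  | nil => simp
  | cons r rs ih =>
    rcases List.nodup_cons.mp hnd with ⟨hr, hrs⟩
    simp only [List.foldl_cons]
    have hrnot : r ∉ sr.getD s [] := fun hmem => hdisj r hmem List.mem_cons_self
    have hstep : (srStepRoute rd sd sr r).getD s []
        = sr.getD s [] ++ (if s ∈ sd.keys ∧ sd.getD s "" ∈ rd.getD r [] then [r] else []) := by
      unfold srStepRoute
      rw [edgefold_getD sd r s hks]
      by_cases hc : s ∈ sd.keys ∧ sd.getD s "" ∈ rd.getD r []
      · rw [if_pos ⟨hc.1, hc.2, hrnot⟩, if_pos hc]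
      · rw [if_neg (by tauto), if_neg hc, List.append_nil]
    have hdisj' : ∀ x ∈ (srStepRoute rd sd sr r).getD s [], x ∉ rs := by
      intro x hx
      rw [hstep] at hx
      rcases List.mem_append.mp hx with hx | hx
      · exact fun hm => hdisj x hx (List.mem_cons_of_mem _ hm)
      · have hxr : x = r := by
          by_cases hc : s ∈ sd.keys ∧ sd.getD s "" ∈ rd.getD r []
          · rw [if_pos hc] at hx; simpa using hx
          · rw [if_neg hc] at hx; simp at hx
        exact hxr ▸ hr
    rw [ih hrs _ hdisj', hstep]
    by_cases h1 : s ∈ sd.keys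
    · by_cases h2 : sd.getD s "" ∈ rd.getD r []
      · rw [if_pos h1, if_pos h1, if_pos ⟨h1, h2⟩, List.filter_cons,
          if_pos (by simpa using h2), List.append_assoc]
        rfl
      · rw [if_pos h1, if_pos h1, if_neg (by tauto), List.filter_cons,
          if_neg (by simpa using h2), List.append_nil]
    · rw [if_neg h1, if_neg h1, if_neg (by tauto), List.append_nil, List.append_nil]

-- keys are never added: every modify hits an existing sensor key
theorem sensorfold_keys (sd : PySem.Dict String String) (r e : String)
    (ks : List String) (sr : PySem.Dict String (List String))
    (h : ∀ k ∈ ks, k ∈ sr.keys) :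
    (ks.foldl (srStepSensor sd r e) sr).keys = sr.keys := by
  induction ks generalizing sr with
  | nil => rfl
  | cons k ks ih =>
    have hk : k ∈ sr.keys := h k List.mem_cons_self
    have hkeys : (srStepSensor sd r e sr k).keys = sr.keys := by
      unfold srStepSensor
      split_ifs with h1 h2
      · rfl
      · rw [PySem.Dict.keys_modify,
          PySem.Dict.keys_insert_of_contains _ _ ((PySem.Dict.contains_iff_mem_keys _ _).mpr hk)]
      · rfl
    simp only [List.foldl_cons]
    rw [ih _ (fun x hx => hkeys ▸ h x (List.mem_cons_of_mem _ hx)), hkeys]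

theorem edgefold_keys (sd : PySem.Dict String String) (r : String)
    (edges : List String) (sr : PySem.Dict String (List String))
    (h : ∀ k ∈ sd.keys, k ∈ sr.keys) :
    (edges.foldl (srStepEdge sd r) sr).keys = sr.keys := by
  induction edges generalizing sr with
  | nil => rfl
  | cons e es ih =>
    simp only [List.foldl_cons]
    have hk : (srStepEdge sd r sr e).keys = sr.keys := sensorfold_keys sd r e _ sr h
    rw [ih _ (fun x hx => hk ▸ h x hx), hk]

theorem routefold_keys (rd : PySem.Dict String (List String)) (sd : PySem.Dict String String)
    (routes : List String) (sr : PySem.Dict String (List String))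
    (h : ∀ k ∈ sd.keys, k ∈ sr.keys) :
    (routes.foldl (srStepRoute rd sd) sr).keys = sr.keys := by
  induction routes generalizing sr with
  | nil => rfl
  | cons r rs ih =>
    simp only [List.foldl_cons]
    have hk : (srStepRoute rd sd sr r).keys = sr.keys := edgefold_keys sd r _ sr h
    rw [ih _ (fun x hx => hk ▸ h x hx), hk]

-- both ports, reduced to the same closed form
theorem A_items (route_edges : List (String × List String)) (sensor_edges : List (String × String)) :
    determine_sensor_routes route_edges sensor_edges
      = (PySem.Dict.ofList sensor_edges).keys.map (fun s =>
          (s, (PySem.Dict.ofList route_edges).keys.filter (fun r =>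
            ((PySem.Dict.ofList route_edges).getD r []).contains
              ((PySem.Dict.ofList sensor_edges).getD s "")))) := by
  simp only [determine_sensor_routes]
  set rd := PySem.Dict.ofList route_edges with hrd
  set sd := PySem.Dict.ofList sensor_edges with hsd
  have hsk : sd.keys.Nodup := PySem.Dict.nodup_keys_ofList _
  have hrk : rd.keys.Nodup := PySem.Dict.nodup_keys_ofList _
  set sr0 := sd.keys.foldl (fun d s => d.insert s ([] : List String)) PySem.Dict.empty with hsr0
  have hitems0 : sr0.items = sd.keys.map (fun s => (s, ([] : List String))) := by
    rw [hsr0]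
    simpa using PySem.Dict.items_foldl_insert_fresh sd.keys (fun s => s)
      (fun _ => ([] : List String)) PySem.Dict.empty (fun a _ => by simp) (by simpa using hsk)
  have hkeys0 : sr0.keys = sd.keys := by
    show sr0.items.map (·.1) = sd.keys
    rw [hitems0, List.map_map]
    simp [Function.comp_def]
  have hgetD0 : ∀ s, sr0.getD s [] = [] := by
    intro s
    by_cases h : s ∈ sd.keys
    · exact PySem.Dict.getD_of_mem_items sr0 (by rw [hitems0]; exact List.mem_map.mpr ⟨s, h, rfl⟩)
        (hkeys0 ▸ hsk) []
    · cases hb : sr0.contains s with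
      | false => exact PySem.Dict.getD_of_not_contains _ _ hb
      | true =>
        exact absurd ((PySem.Dict.contains_iff_mem_keys _ _).mp hb) (fun hm => h (hkeys0 ▸ hm))
  have hkeysF : (rd.keys.foldl (srStepRoute rd sd) sr0).keys = sd.keys := by
    rw [routefold_keys rd sd rd.keys sr0 (fun k hk => hkeys0 ▸ hk), hkeys0]
  rw [PySem.Dict.items_eq_map_keys _ (hkeysF ▸ hsk) ([] : List String), hkeysF]
  apply List.map_congr_left
  intro s hs
  rw [routefold_getD rd sd s hsk rd.keys hrk sr0
      (by intro x hx; rw [hgetD0] at hx; cases hx),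
    hgetD0, if_pos hs, List.nil_append]

theorem B_items (route_edges : List (String × List String)) (sensor_edges : List (String × String)) :
    determine_sensor_routes_alt route_edges sensor_edges
      = (PySem.Dict.ofList sensor_edges).keys.map (fun s =>
          (s, (PySem.Dict.ofList route_edges).keys.filter (fun r =>
            ((PySem.Dict.ofList route_edges).getD r []).contains
              ((PySem.Dict.ofList sensor_edges).getD s "")))) := by
  simp only [determine_sensor_routes_alt]
  set rd := PySem.Dict.ofList route_edges with hrd
  set sd := PySem.Dict.ofList sensor_edges with hsd
  have hsk : sd.keys.Nodup := PySem.Dict.nodup_keys_ofList _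
  have hrk : rd.keys.Nodup := PySem.Dict.nodup_keys_ofList _
  set e2r := rd.items.foldl e2rStep PySem.Dict.empty with he2rdef
  have hres : (sd.items.foldl (fun d q => d.insert q.1 (e2r.getD q.2 [])) PySem.Dict.empty).items
      = sd.items.map (fun q => (q.1, e2r.getD q.2 [])) := by
    simpa using PySem.Dict.items_foldl_insert_fresh sd.items (fun q => q.1)
      (fun q => e2r.getD q.2 []) PySem.Dict.empty (fun a _ => by simp)
      (by simpa [PySem.Dict.keys] using hsk)
  rw [hres, PySem.Dict.items_eq_map_keys sd hsk "", List.map_map]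
  apply List.map_congr_left
  intro s hs
  simp only [Function.comp]
  rw [he2rdef, e2r_getD, PySem.Dict.getD_empty, List.nil_append,
    PySem.Dict.items_eq_map_keys rd hrk ([] : List String), List.filter_map, List.map_map]
  simp [Function.comp_def]

-- ===== VERDICT (by name: the statement is the Claim_ definition above) =====
theorem determine_sensor_routes_spec : Claim_equal_determine_sensor_routes := by
  intro route_edges sensor_edges _
  unfold Spec_determine_sensor_routes
  rw [A_items, B_items]
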